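-- pv_equiv track=rewrite | github.com/lilobanova/lr_12l | py12/ind1.py | el_min
-- ===== SOURCE A (Python) =====
-- def el_min(i, mini, list):
--     if i == len(list):
--         return mini
--     else:
--         if list[i] < mini:
--             mini = list[i]
--         i += 1
--     return el_min(i, mini, list)
-- ===== SOURCE B (Python) =====
-- def el_min(i, mini, list):
--     # Iterative fold over the suffix instead of index recursion.
--     for x in list[max(i, 0):]:
--         if x < mini:
--             mini = x
--     return mini
-- ===== Notes on version B (the rewrite author's own statement) =====
-- stated objective: simpler
-- what changed: Replaced the index-carrying tail recursion by a plain for-loop over the slice list[max(i,0):], folding the accumulator in place (negative starts still cover the whole list, as A's wraparound scan does).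
import Mathlib
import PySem

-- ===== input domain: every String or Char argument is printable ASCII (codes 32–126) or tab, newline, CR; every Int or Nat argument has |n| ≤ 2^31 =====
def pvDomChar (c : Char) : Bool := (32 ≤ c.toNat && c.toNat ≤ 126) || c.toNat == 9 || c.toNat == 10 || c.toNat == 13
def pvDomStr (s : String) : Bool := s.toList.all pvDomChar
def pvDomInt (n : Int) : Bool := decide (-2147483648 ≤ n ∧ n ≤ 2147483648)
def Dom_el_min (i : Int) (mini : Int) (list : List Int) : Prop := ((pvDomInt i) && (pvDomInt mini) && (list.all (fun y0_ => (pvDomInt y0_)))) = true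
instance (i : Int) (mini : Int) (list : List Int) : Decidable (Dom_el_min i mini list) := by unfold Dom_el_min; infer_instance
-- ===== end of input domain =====

-- B is a plain iterative fold over the suffix list[max(i,0):] instead of A's index-carrying tail recursion.

-- ===== PORT A =====
-- literal transliteration of A's tail recursion; the `none` branch is Python's IndexError (excluded by Pre_)
def el_min (i : Int) (mini : Int) (list : List Int) : Int :=
  if i = (list.length : Int) then mini
  else
    match h : PySem.List.pyGet? list i with
    | none => mini   -- IndexError in Python; unreachable under Pre_el_min
    | some x => el_min (i + 1) (if x < mini then x else mini) list
termination_by ((list.length : Int) + 1 - i).toNat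
decreasing_by
  have hin : PySem.Raise.InRange list.length i := by
    by_contra hc
    rw [(PySem.List.pyGet?_eq_none_iff list i).2 hc] at h
    simp at h
  unfold PySem.Raise.InRange at hin
  omega

-- ===== PORT B =====
def el_min_alt (i : Int) (mini : Int) (list : List Int) : Int :=
  (PySem.List.slice list (some (max i 0)) none).foldl
    (fun mini x => if x < mini then x else mini) mini

-- ===== PRECONDITION & SPEC =====
-- exactly the inputs on which A's recursion terminates normally: list[i] never out of range
def Pre_el_min (i : Int) (mini : Int) (list : List Int) : Prop :=
  -(list.length : Int) ≤ i ∧ i ≤ (list.length : Int)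
instance (i : Int) (mini : Int) (list : List Int) : Decidable (Pre_el_min i mini list) := by
  unfold Pre_el_min; infer_instance
def pvWitness_el_min : Int × Int × List Int := (0, 5, [3, 7, 2])

def Spec_el_min (i : Int) (mini : Int) (list : List Int) (out : Int) : Prop := out = el_min_alt i mini list
instance (i : Int) (mini : Int) (list : List Int) (out : Int) : Decidable (Spec_el_min i mini list out) := by unfold Spec_el_min; infer_instance

-- ===== CLAIM (what is proved, stated in full; the proofs are below) =====
def Claim_equal_el_min : Prop := ∀ (i : Int) (mini : Int) (list : List Int), Dom_el_min i mini list → Pre_el_min i mini list → Spec_el_min i mini list (el_min i mini list)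

-- ===== LEMMAS AND PROOFS =====

-- B's loop body is `min`
theorem body_eq_min : (fun (mini x : Int) => if x < mini then x else mini) = min := by
  funext m x
  simp only [min_def]
  split_ifs <;> omega

-- absorbing one extra element that already occurs in the list
theorem foldl_min_absorb (l : List Int) (a x : Int) (hx : x ∈ l) :
    List.foldl min (min a x) l = List.foldl min a l := by
  induction l generalizing a with
  | nil => cases hx
  | cons b l ih =>
    rcases List.mem_cons.1 hx with h | h
    · subst h
      simp only [List.foldl_cons]
      rw [min_assoc, min_self]
    · simp only [List.foldl_cons]
      rw [min_right_comm]
      exact ih (min a b) h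

-- absorbing a whole prefix fold whose elements occur in the list
theorem foldl_min_absorb_list (s : List Int) (l : List Int) (a : Int)
    (hs : ∀ x ∈ s, x ∈ l) :
    List.foldl min (List.foldl min a s) l = List.foldl min a l := by
  induction s generalizing a with
  | nil => rfl
  | cons x s ih =>
    simp only [List.foldl_cons]
    rw [ih (min a x) (fun y hy => hs y (List.mem_cons_of_mem x hy))]
    exact foldl_min_absorb l a x (hs x (List.mem_cons_self))

-- unfolding A one step when the index is in range
theorem el_min_step (i : Int) (mini : Int) (list : List Int) (x : Int)
    (hx : PySem.List.pyGet? list i = some x) (hne : i ≠ (list.length : Int)) :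
    el_min i mini list = el_min (i + 1) (if x < mini then x else mini) list := by
  rw [el_min, if_neg hne]
  split
  · next heq => rw [hx] at heq; simp at heq
  · next y heq => rw [hx] at heq; cases heq; rfl

-- A at the terminal index
theorem el_min_base (mini : Int) (list : List Int) :
    el_min (list.length : Int) mini list = mini := by
  rw [el_min, if_pos rfl]

-- A at a nonnegative index is the fold over the dropped suffix
theorem el_min_nonneg (list : List Int) :
    ∀ (n k : Nat) (mini : Int), k + n = list.length →
      el_min (k : Int) mini list = List.foldl min mini (list.drop k) := by
  intro n
  induction n with
  | zero =>
    intro k mini hk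
    have : k = list.length := by omega
    subst this
    rw [el_min_base]
    simp
  | succ n ih =>
    intro k mini hk
    have hk' : k < list.length := by omega
    rw [el_min_step (k : Int) mini list list[k] (PySem.List.pyGet?_ofNat list k hk')
        (by omega)]
    have hc : (k : Int) + 1 = ((k + 1 : Nat) : Int) := by push_cast; ring
    rw [hc, ih (k + 1) _ (by omega)]
    rw [List.drop_eq_getElem_cons hk', List.foldl_cons]
    congr 1
    simp only [min_def]
    split_ifs <;> omega

-- A at a negative index -m first folds the last m elements, then restarts at 0
theorem el_min_neg (list : List Int) :
    ∀ (m : Nat), 1 ≤ m → m ≤ list.length → ∀ (mini : Int),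
      el_min (-(m : Int)) mini list
        = el_min 0 (List.foldl min mini (list.drop (list.length - m))) list := by
  intro m
  induction m with
  | zero => intro h; omega
  | succ m ih =>
    intro _ hle mini
    have hidx : list.length - (m + 1) < list.length := by omega
    have hget : PySem.List.pyGet? list (-((m + 1 : Nat) : Int))
        = some list[list.length - (m + 1)] := by
      rw [PySem.List.pyGet?_neg_natCast list (m + 1) (by omega) hle]
      exact List.getElem?_eq_getElem hidx
    rw [el_min_step _ mini list _ hget (by push_cast; omega)]
    have harith : list.length - (m + 1) + 1 = list.length - m := by omega
    have hdrop : list.drop (list.length - (m + 1))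
        = list[list.length - (m + 1)] :: list.drop (list.length - m) := by
      rw [List.drop_eq_getElem_cons hidx, harith]
    rw [hdrop, List.foldl_cons]
    have hbody : (if list[list.length - (m + 1)] < mini then list[list.length - (m + 1)] else mini)
        = min mini list[list.length - (m + 1)] := by
      simp only [min_def]; split_ifs <;> omega
    rcases Nat.eq_zero_or_pos m with hm | hm
    · subst hm
      rw [hbody, show (-(((0 + 1 : Nat)) : Int) + 1) = 0 by norm_num]
      simp
    · rw [show (-(((m + 1 : Nat)) : Int) + 1) = -((m : Nat) : Int) by push_cast; ring,
          hbody, ih hm (by omega)]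

-- B unfolded to a fold of `min` over the appropriate suffix
theorem el_min_alt_eq (i : Int) (mini : Int) (list : List Int) :
    el_min_alt i mini list = List.foldl min mini (list.drop (max i 0).toNat) := by
  unfold el_min_alt
  rw [body_eq_min, PySem.List.slice_from list (le_max_right i 0)]

-- ===== VERDICT (by name: the statement is the Claim_ definition above) =====
theorem el_min_spec : Claim_equal_el_min := by
  intro i mini list _ hpre
  unfold Spec_el_min
  rcases hpre with ⟨h1, h2⟩
  rw [el_min_alt_eq]
  by_cases hi : 0 ≤ i
  · -- nonnegative start: both are the fold over list.drop i
    have hk : i = ((i.toNat : Nat) : Int) := by omega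
    rw [hk, el_min_nonneg list (list.length - i.toNat) i.toNat mini (by omega)]
    congr 2
    omega
  · -- negative start: A wraps around and covers the whole list; B folds the whole list
    have hm : i = -(((-i).toNat : Nat) : Int) := by omega
    have h1' : 1 ≤ (-i).toNat := by omega
    have h2' : (-i).toNat ≤ list.length := by omega
    have h0 := el_min_nonneg list list.length 0
        (List.foldl min mini (list.drop (list.length - (-i).toNat))) (by omega)
    simp only [Nat.cast_zero, List.drop_zero] at h0
    rw [hm, el_min_neg list (-i).toNat h1' h2' mini, h0]
    rw [foldl_min_absorb_list _ _ _ (fun x hx => List.mem_of_mem_drop hx)]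
    have hmax : max (-(((-i).toNat : Nat) : Int)) 0 = 0 := by
      rw [max_eq_right]
      omega
    rw [hmax]
    simp
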